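-- pv_equiv track=rewrite | github.com/Wonjae98/Company-UserMatcher | matching.py | find_sim_user
-- ===== SOURCE A (Python) =====
-- def find_sim_user(user_info, combine_list):
--     user_match_count = {}
--     for i, j in user_info.items():
--         set1 = set(j) #유저의 역량 정보
--         set2 = set(combine_list) #기업이 원하는 역량
--         common_list = list(set1 & set2) # 일치하는 역량 리스트
--         user_match_count[i] = len(common_list)
--
--     user_match_count = dict(sorted(user_match_count.items(), key=lambda x: x[1], reverse=True))
--     # user_match_count 딕셔너리를 일치하는 역량의 개수 순서대로 정렬해줌
--
--     for i, j in list(user_match_count.items()):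
--         if j == 0:
--             del (user_match_count[i])
--     # user 딕셔너리에서 count가 0인 user 들은 삭제해줌
--
--     user_match_count = list(user_match_count.items())
--     user_name_top3 = []
--
--     user_top3 = {}
--     # 겹치는 스킬,프레임워크,기타가 0인 유저들을 제외한 나머지 유저들 중 상위 3명을 리턴해줌
--     for i, j in enumerate(user_match_count):
--         user_name_top3.append(user_match_count[i][0])
--
--         for i, j in enumerate(user_name_top3):
--             user_top3[j] = user_info[j]
--     return user_top3, user_match_count
-- ===== SOURCE B (Python) =====
-- def find_sim_user(user_info, combine_list):
--     # Bucket (counting) sort by overlap count instead of a comparison sort.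
--     need = set(combine_list)
--     buckets = []  # buckets[c] = names with exactly c matching skills, in dict order
--     for name, skills in user_info.items():
--         c = len({s for s in skills if s in need})
--         if len(buckets) <= c:
--             buckets.extend([] for _ in range(c + 1 - len(buckets)))
--         buckets[c].append(name)
--     ranked = []
--     top = {}
--     for c in range(len(buckets) - 1, 0, -1):
--         for name in buckets[c]:
--             ranked.append((name, c))
--             top[name] = user_info[name]
--     return top, ranked
-- ===== Notes on version B (the rewrite author's own statement) =====
-- stated objective: faster
-- what changed: B replaces A's comparison sort plus zero-delete pass plus quadratic nested dict-reinsertion loop by a counting/bucket sort: one pass drops each user into buckets[overlap], then one descending sweep over the buckets (skipping bucket 0) emits the ranked list and the result dict directly.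
import Mathlib
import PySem

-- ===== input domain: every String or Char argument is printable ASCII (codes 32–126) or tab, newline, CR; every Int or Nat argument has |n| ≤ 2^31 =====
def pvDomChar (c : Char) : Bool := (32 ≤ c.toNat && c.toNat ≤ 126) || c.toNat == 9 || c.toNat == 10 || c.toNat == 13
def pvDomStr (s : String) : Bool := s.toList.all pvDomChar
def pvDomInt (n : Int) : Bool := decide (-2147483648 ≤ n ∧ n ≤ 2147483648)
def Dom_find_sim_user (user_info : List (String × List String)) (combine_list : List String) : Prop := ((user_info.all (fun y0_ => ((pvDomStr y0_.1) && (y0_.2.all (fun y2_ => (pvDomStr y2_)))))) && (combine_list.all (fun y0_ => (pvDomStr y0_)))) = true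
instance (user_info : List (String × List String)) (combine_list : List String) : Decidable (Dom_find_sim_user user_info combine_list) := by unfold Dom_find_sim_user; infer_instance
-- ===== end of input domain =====

-- B replaces A's comparison sort + zero-delete pass + nested dict-reinsertion loop by a
-- counting/bucket sort over the overlap counts (objective: faster).

-- ===== PORT A =====
def find_sim_user (user_info : List (String × List String)) (combine_list : List String) : (List (String × List String)) × (List (String × Int)) :=
  -- user_info is a Python dict: build it as PySem.Dict (duplicate keys collapse, last value, first position)
  let d : PySem.Dict String (List String) := user_info.foldl (fun dd p => dd.insert p.1 p.2) PySem.Dict.empty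
  -- first loop: user_match_count[i] = len(list(set(j) & set(combine_list)))
  let umc0 : PySem.Dict String Int := d.items.foldl
      (fun m p => m.insert p.1 (PySem.Set.len (PySem.Set.inter (PySem.Set.ofList p.2) (PySem.Set.ofList combine_list))))
      PySem.Dict.empty
  -- user_match_count = dict(sorted(items, key=lambda x: x[1], reverse=True))
  let sortedItems := PySem.List.sorted umc0.items (fun x => x.2) true
  let umc1 : PySem.Dict String Int := PySem.Dict.ofList sortedItems
  -- second loop: delete the users whose count is 0
  let umc2 : PySem.Dict String Int := sortedItems.foldl (fun dd p => if p.2 == 0 then dd.erase p.1 else dd) umc1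
  let lst := umc2.items
  -- nested third loop: append user_match_count[i][0], then re-insert user_info[j] for every name so far
  -- (user_info[j] is always present, so getD [] never takes its default)
  let fin := (PySem.List.enumerate lst).foldl
      (fun (st : List String × PySem.Dict String (List String)) e =>
        let names := st.1 ++ [(PySem.List.pyGetD lst e.1 ("", 0)).1]
        let top := names.foldl (fun dd n => dd.insert n (PySem.Dict.getD d n [])) st.2
        (names, top))
      ([], PySem.Dict.empty)
  (fin.2.items, lst)

-- ===== PORT B =====
def find_sim_user_alt (user_info : List (String × List String)) (combine_list : List String) : (List (String × List String)) × (List (String × Int)) :=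
  let d : PySem.Dict String (List String) := user_info.foldl (fun dd p => dd.insert p.1 p.2) PySem.Dict.empty
  let need : PySem.Set String := PySem.Set.ofList combine_list
  -- bucket loop: c = len({s for s in skills if s in need}); grow buckets; buckets[c].append(name)
  let buckets : List (List String) := d.items.foldl
      (fun bks p =>
        let c : Nat := (PySem.Set.ofList (p.2.filter (fun s => need.contains s))).length
        let bks' := if bks.length ≤ c then bks ++ List.replicate (c + 1 - bks.length) ([] : List String) else bks
        bks'.modify c (fun b => b ++ [p.1]))
      []
  -- output loop: for c in range(len(buckets)-1, 0, -1): for name in buckets[c]: append / top[name] = user_info[name]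
  let fin := (PySem.List.pyRange ((buckets.length : Int) - 1) 0 (-1)).foldl
      (fun (st : List (String × Int) × PySem.Dict String (List String)) c =>
        (PySem.List.pyGetD buckets c []).foldl
          (fun st n => (st.1 ++ [(n, c)], st.2.insert n (PySem.Dict.getD d n [])))
          st)
      ([], PySem.Dict.empty)
  (fin.2.items, fin.1)

-- ===== PRECONDITION & SPEC =====
def Spec_find_sim_user (user_info : List (String × List String)) (combine_list : List String) (out : (List (String × List String)) × (List (String × Int))) : Prop := out = find_sim_user_alt user_info combine_list
instance (user_info : List (String × List String)) (combine_list : List String) (out : (List (String × List String)) × (List (String × Int))) : Decidable (Spec_find_sim_user user_info combine_list out) := by unfold Spec_find_sim_user; infer_instance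

-- ===== CLAIM (what is proved, stated in full; the proofs are below) =====
def Claim_equal_find_sim_user : Prop := ∀ (user_info : List (String × List String)) (combine_list : List String), Dom_find_sim_user user_info combine_list → Spec_find_sim_user user_info combine_list (find_sim_user user_info combine_list)

-- ===== LEMMAS AND PROOFS =====

-- ---- A-side lemmas ----

-- inserting a binding the dict already holds (same key, same value) changes nothing
lemma dict_insert_eq_self {ν : Type} (d : PySem.Dict String ν) (k : String) (v : ν)
    (hnd : d.keys.Nodup) (h : d.get? k = some v) : d.insert k v = d := by
  apply PySem.Dict.ext
  have hc : d.contains k = true := by rw [PySem.Dict.contains_eq_isSome_get?, h]; rfl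
  rw [PySem.Dict.items_insert_of_contains d v hc]
  have : ∀ p ∈ d.items, (if (p.1 == k) = true then (k, v) else p) = p := by
    intro p hp
    by_cases hk : (p.1 == k) = true
    · have hk' : p.1 = k := by simpa using hk
      have := PySem.Dict.get?_of_mem_items d (k := p.1) (v := p.2) hp hnd
      rw [hk', h] at this
      have hv : v = p.2 := Option.some_inj.mp this
      simp [hk]
      exact Prod.ext hk'.symm hv
    · simp [hk]
  rw [List.map_congr_left this]
  simp

-- re-inserting bindings the dict already holds is the identity fold
lemma foldl_insert_id {ν : Type} (f : String → ν) :
    ∀ (names : List String) (d : PySem.Dict String ν),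
      d.keys.Nodup → (∀ n ∈ names, d.get? n = some (f n)) →
      names.foldl (fun dd n => dd.insert n (f n)) d = d := by
  intro names
  induction names with
  | nil => intro d _ _; rfl
  | cons n rest ih =>
      intro d hnd h
      simp only [List.foldl_cons]
      rw [dict_insert_eq_self d n (f n) hnd (h n (by simp))]
      exact ih d hnd (fun m hm => h m (by simp [hm]))

-- A's nested "top3" loop: its dict ends up mapping every name of lst, in order, to f name
lemma outer_loop (f : String → List String) (lst : List (String × Int))
    (hnd : (lst.map (fun p => p.1)).Nodup) :
    ∀ (suf pre : List (String × Int)) (st : List String × PySem.Dict String (List String)),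
      lst = pre ++ suf →
      st.1 = pre.map (fun p => p.1) →
      st.2.items = pre.map (fun p => (p.1, f p.1)) →
      ((PySem.List.enumerate suf (pre.length : Int)).foldl
         (fun (st : List String × PySem.Dict String (List String)) e =>
           let names := st.1 ++ [(PySem.List.pyGetD lst e.1 ("", 0)).1]
           let top := names.foldl (fun dd n => dd.insert n (f n)) st.2
           (names, top)) st).2.items
        = lst.map (fun p => (p.1, f p.1)) := by
  intro suf
  induction suf with
  | nil =>
      intro pre st hl _ hitems
      simp only [PySem.List.enumerate_nil, List.foldl_nil]
      rw [hitems, hl, List.append_nil]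
  | cons x rest ih =>
      intro pre st hl hfst hitems
      have hget : PySem.List.pyGetD lst (pre.length : Int) ("", 0) = x := by
        rw [PySem.List.pyGetD_natCast, hl]
        simp [List.getD]
      have hkeys : lst.map (fun p => p.1) = pre.map (fun p => p.1) ++ (x.1 :: rest.map (fun p => p.1)) := by
        rw [hl]; simp
      have hnd' := hnd
      rw [hkeys, List.nodup_append] at hnd'
      obtain ⟨hnd1, hnd2, hdisj⟩ := hnd'
      have hxnotin : x.1 ∉ pre.map (fun p => p.1) := by
        intro hmem
        exact hdisj x.1 hmem x.1 (by simp) rfl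
      have hskeys : st.2.keys = pre.map (fun p => p.1) := by
        simp only [PySem.Dict.keys, hitems, List.map_map]
        rfl
      have hsnd : st.2.keys.Nodup := by rw [hskeys]; exact hnd1
      have hget? : ∀ n ∈ pre.map (fun p => p.1), st.2.get? n = some (f n) := by
        intro n hn
        obtain ⟨p, hp, rfl⟩ := List.mem_map.mp hn
        exact PySem.Dict.get?_of_mem_items st.2
          (by rw [hitems]; exact List.mem_map.mpr ⟨p, hp, rfl⟩) hsnd
      have hcont : st.2.contains x.1 = false := by
        rw [PySem.Dict.contains_eq_decide_mem_keys, hskeys]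
        simpa using hxnotin
      rw [PySem.List.enumerate_cons, List.foldl_cons]
      have hstep :
          (fun (st : List String × PySem.Dict String (List String)) (e : Int × (String × Int)) =>
            let names := st.1 ++ [(PySem.List.pyGetD lst e.1 ("", 0)).1]
            let top := names.foldl (fun dd n => dd.insert n (f n)) st.2
            (names, top)) st ((pre.length : Int), x)
          = (st.1 ++ [x.1], st.2.insert x.1 (f x.1)) := by
        simp only [hget, List.foldl_append, List.foldl_cons, List.foldl_nil]
        rw [hfst, foldl_insert_id f (pre.map (fun p => p.1)) st.2 hsnd hget?]
      simp only [hstep]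
      have hlen : ((pre.length : Int) + 1) = (((pre ++ [x]).length : Nat) : Int) := by
        simp
      rw [hlen]
      apply ih (pre ++ [x]) (st.1 ++ [x.1], st.2.insert x.1 (f x.1))
      · rw [hl]; simp
      · rw [hfst]; simp
      · rw [PySem.Dict.items_insert_of_not_contains st.2 (f x.1) hcont, hitems]
        simp

-- the deletion loop over the items of a dict is a filter on its items
lemma erase_fold_items :
    ∀ (l : List (String × Int)) (d : PySem.Dict String Int),
      (l.foldl (fun dd p => if p.2 == 0 then dd.erase p.1 else dd) d).items
      = d.items.filter (fun q => l.all (fun p => !(p.2 == 0) || !(q.1 == p.1))) := by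
  intro l
  induction l with
  | nil => intro d; simp
  | cons p rest ih =>
      intro d
      simp only [List.foldl_cons]
      rw [ih]
      by_cases h0 : (p.2 == 0) = true
      · rw [if_pos h0]
        have he : (d.erase p.1).items = d.items.filter (fun q => !(q.1 == p.1)) := rfl
        rw [he, List.filter_filter]
        congr 1
        funext q
        simp [h0, Bool.and_comm]
      · rw [if_neg h0]
        congr 1
        funext q
        simp [h0]

-- dict(l) for a pair list with distinct keys has exactly l as its items
lemma ofList_items_of_nodup (l : List (String × Int)) (h : (l.map (fun p => p.1)).Nodup) :
    (PySem.Dict.ofList l).items = l := by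
  show (l.foldl (fun acc p => acc.insert p.1 p.2) PySem.Dict.empty).items = l
  rw [PySem.Dict.items_foldl_insert_fresh l (fun p => p.1) (fun p => p.2) PySem.Dict.empty
    (by intro a _; simp) h]
  simp [PySem.Dict.empty]

-- ---- B-side lemmas: bucket sort = stable descending sort ----

-- one bucket, tagged with its count
def pvTag (c : Nat) (b : List String) : List (String × Int) := b.map (fun n => (n, (c : Int)))

-- put a name into bucket k, growing the bucket list as needed
def pvPut (n : String) : List (List String) → Nat → List (List String)
  | [], k => List.replicate k [] ++ [[n]]
  | b :: bs, 0 => (b ++ [n]) :: bs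
  | b :: bs, k+1 => b :: pvPut n bs k

-- flatten the buckets from the highest index down, tagging entries with index (offset i)
def pvFlat : List (List String) → Nat → List (String × Int)
  | [], _ => []
  | b :: bs, i => pvFlat bs (i+1) ++ pvTag i b

-- same flatten via getD, buckets k-1 down to 0
def pvFlatIdx (bks : List (List String)) : Nat → List (String × Int)
  | 0 => []
  | k+1 => pvTag k (bks.getD k []) ++ pvFlatIdx bks k

-- buckets k down to 1 (what B's output loop traverses)
def pvRFlat (bks : List (List String)) : Nat → List (String × Int)
  | 0 => []
  | k+1 => pvTag (k+1) (bks.getD (k+1) []) ++ pvRFlat bks k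

lemma insertBy_cons {α : Type} (before : α → α → Bool) (x y : α) (ys : List α) :
    PySem.List.insertBy before x (y :: ys)
      = if before x y then x :: y :: ys else y :: PySem.List.insertBy before x ys := rfl

lemma insertBy_append_right {α : Type} (before : α → α → Bool) (x : α) (A B : List α)
    (h : ∀ b ∈ B, before x b = true) :
    PySem.List.insertBy before x (A ++ B) = PySem.List.insertBy before x A ++ B := by
  induction A with
  | nil =>
      cases B with
      | nil => rfl
      | cons b B => rw [List.nil_append, insertBy_cons, if_pos (h b (by simp))]; rfl
  | cons a A ih =>
      rw [List.cons_append, insertBy_cons, insertBy_cons]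
      by_cases hb : before x a = true
      · rw [if_pos hb, if_pos hb]; rfl
      · rw [if_neg hb, if_neg hb, ih]; rfl

lemma pvFlat_bounds : ∀ (bks : List (List String)) (i : Nat) (p : String × Int),
    p ∈ pvFlat bks i → (i : Int) ≤ p.2 ∧ p.2 < (i : Int) + bks.length := by
  intro bks
  induction bks with
  | nil => intro i p hp; simp [pvFlat] at hp
  | cons b bs ih =>
      intro i p hp
      rw [pvFlat, List.mem_append] at hp
      rcases hp with hp | hp
      · have h2 := ih (i + 1) p hp
        simp only [List.length_cons] at h2 ⊢
        push_cast at h2 ⊢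
        omega
      · obtain ⟨n, _, rfl⟩ := List.mem_map.mp hp
        simp only [List.length_cons]
        push_cast
        omega

lemma pvFlat_replicate (n : String) : ∀ (k i : Nat),
    pvFlat (List.replicate k [] ++ [[n]]) i = [(n, ((i + k : Nat) : Int))] := by
  intro k
  induction k with
  | zero => intro i; simp [pvFlat, pvTag]
  | succ k ih =>
      intro i
      rw [List.replicate_succ, List.cons_append, pvFlat, ih (i + 1)]
      have : i + 1 + k = i + (k + 1) := by omega
      rw [this]
      simp [pvTag]

-- inserting (n, c) into the descending flatten = flattening after pvPut
-- inserting (n, c) into the descending flatten = flattening after pvPut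
lemma insert_flat (n : String) (c : Nat) : ∀ (bks : List (List String)) (i : Nat), i ≤ c →
    PySem.List.insertBy (fun a b => decide (b.2 < a.2)) (n, (c : Int)) (pvFlat bks i)
      = pvFlat (pvPut n bks (c - i)) i := by
  intro bks
  induction bks with
  | nil =>
      intro i hic
      rw [pvFlat, pvPut, pvFlat_replicate]
      have : i + (c - i) = c := by omega
      rw [this]
      rfl
  | cons b bs ih =>
      intro i hic
      rw [pvFlat]
      by_cases heq : i = c
      · subst heq
        have hall : ∀ y ∈ pvFlat bs (i + 1) ++ pvTag i b,
            (fun (a b : String × Int) => decide (b.2 < a.2)) (n, (i : Int)) y = false := by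
          intro y hy
          rw [List.mem_append] at hy
          rcases hy with hy | hy
          · have := (pvFlat_bounds bs (i + 1) y hy).1
            simp only [decide_eq_false_iff_not, not_lt]
            push_cast at this ⊢
            omega
          · obtain ⟨m, _, rfl⟩ := List.mem_map.mp hy
            simp
        rw [PySem.List.insertBy_of_forall_not_before _ _ _ hall, Nat.sub_self, pvPut, pvFlat]
        simp [pvTag]
      · have hlt : i < c := by omega
        have htag : ∀ y ∈ pvTag i b,
            (fun (a b : String × Int) => decide (b.2 < a.2)) (n, (c : Int)) y = true := by
          intro y hy
          obtain ⟨m, _, rfl⟩ := List.mem_map.mp hy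
          simp only [decide_eq_true_eq]
          omega
        rw [insertBy_append_right _ _ _ _ htag, ih (i + 1) (by omega)]
        have hsub : c - i = (c - (i + 1)) + 1 := by omega
        rw [hsub, pvPut, pvFlat]

-- B's bucket-update step is pvPut
-- appending into bucket c of an all-empty bucket list of length c+1
lemma modify_replicate (n : String) : ∀ (c : Nat),
    (List.replicate (c + 1) ([] : List String)).modify c (fun b => b ++ [n])
      = List.replicate c [] ++ [[n]] := by
  intro c
  induction c with
  | zero => simp [List.modify]
  | succ c ih =>
      have hsucc : ∀ (a : List String) (l : List (List String)) (k : Nat) (f : List String → List String),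
          (a :: l).modify (k + 1) f = a :: l.modify k f := by
        intro a l k f; simp [List.modify]
      rw [List.replicate_succ, hsucc, ih]
      simp [List.replicate_succ]

-- B's bucket-update step is pvPut
lemma step_eq_put (n : String) : ∀ (bks : List (List String)) (c : Nat),
    (if bks.length ≤ c then bks ++ List.replicate (c + 1 - bks.length) ([] : List String) else bks).modify c (fun b => b ++ [n])
      = pvPut n bks c := by
  intro bks
  induction bks with
  | nil =>
      intro c
      rw [if_pos (by simp), List.nil_append, List.length_nil, Nat.sub_zero, modify_replicate, pvPut]
  | cons b bs ih =>
      intro c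
      have hsucc : ∀ (a : List String) (l : List (List String)) (k : Nat) (f : List String → List String),
          (a :: l).modify (k + 1) f = a :: l.modify k f := by
        intro a l k f; simp [List.modify]
      cases c with
      | zero =>
          rw [if_neg (by simp), pvPut]
          simp [List.modify]
      | succ c =>
          by_cases hle : bs.length ≤ c
          · rw [if_pos (by simp only [List.length_cons]; omega)]
            have harith : c + 1 + 1 - (b :: bs).length = c + 1 - bs.length := by
              simp only [List.length_cons]; omega
            rw [harith, List.cons_append, hsucc, pvPut]
            have := ih c
            rw [if_pos hle] at this
            rw [this]
          · rw [if_neg (by simp only [List.length_cons]; omega), hsucc, pvPut]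
            have := ih c
            rw [if_neg hle] at this
            rw [this]

-- pvPut never yields an empty bucket list
lemma pvPut_ne_nil (n : String) : ∀ (bks : List (List String)) (c : Nat), pvPut n bks c ≠ [] := by
  intro bks c
  cases bks <;> cases c <;> simp [pvPut]

lemma pvFlat_append : ∀ (bs : List (List String)) (b : List String) (i : Nat),
    pvFlat (bs ++ [b]) i = pvTag (i + bs.length) b ++ pvFlat bs i := by
  intro bs
  induction bs with
  | nil => intro b i; simp [pvFlat]
  | cons a bs ih =>
      intro b i
      rw [List.cons_append, pvFlat, ih b (i + 1), pvFlat, List.append_assoc]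
      have : i + 1 + bs.length = i + (a :: bs).length := by simp only [List.length_cons]; omega
      rw [this]

lemma pvFlatIdx_append (bs : List (List String)) (b : List String) :
    ∀ (k : Nat), k ≤ bs.length → pvFlatIdx (bs ++ [b]) k = pvFlatIdx bs k := by
  intro k
  induction k with
  | zero => intro _; rfl
  | succ k ih =>
      intro hk
      rw [pvFlatIdx, pvFlatIdx, ih (by omega), List.getD_append _ _ _ _ (by omega)]

lemma pvFlat_eq_flatIdx : ∀ (bks : List (List String)), pvFlat bks 0 = pvFlatIdx bks bks.length := by
  intro bks
  induction bks using List.reverseRecOn with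
  | nil => rfl
  | append_singleton bs b ih =>
      rw [pvFlat_append, ih]
      have hget : (bs ++ [b]).getD bs.length [] = b := by
        rw [List.getD_eq_getElem?_getD, List.getElem?_append_right (by omega)]
        simp
      have hlen : (bs ++ [b]).length = bs.length + 1 := by simp
      rw [hlen, pvFlatIdx, hget, pvFlatIdx_append bs b bs.length (by omega)]
      simp

lemma filter_flatIdx (bks : List (List String)) :
    ∀ (k : Nat), (pvFlatIdx bks (k+1)).filter (fun p => decide (0 < p.2)) = pvRFlat bks k := by
  intro k
  induction k with
  | zero =>
      rw [pvFlatIdx, pvFlatIdx, pvRFlat, List.append_nil, pvTag, List.filter_map]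
      have : ∀ m : String, ((fun (p : String × Int) => decide (0 < p.2)) ∘ (fun n => (n, ((0:Nat) : Int)))) m = false := by
        intro m; simp
      rw [List.filter_congr (fun m _ => this m)]
      simp
  | succ k ih =>
      rw [pvFlatIdx, List.filter_append, ih, pvRFlat, pvTag, List.filter_map]
      have : ∀ m : String, ((fun (p : String × Int) => decide (0 < p.2)) ∘ (fun n => (n, ((k+1:Nat) : Int)))) m = true := by
        intro m; simp
      rw [List.filter_congr (fun m _ => this m)]
      simp

lemma pyRange_down_succ (k : Nat) :
    PySem.List.pyRange ((k : Int) + 1) 0 (-1) = ((k : Int) + 1) :: PySem.List.pyRange (k : Int) 0 (-1) := by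
  simp only [PySem.List.pyRange]
  norm_num
  have h : (if 0 < k then k else 0) = k := by split <;> omega
  rw [h, List.range_succ_eq_map, List.map_cons, List.map_map]
  congr 1
  apply List.map_congr_left
  intro j _
  simp only [Function.comp_apply, Nat.succ_eq_add_one]
  push_cast
  ring

lemma pyRange_down_zero : PySem.List.pyRange (0 : Int) 0 (-1) = [] := by
  simp [PySem.List.pyRange]

-- inner output loop over one bucket
lemma inner_out_loop (d : PySem.Dict String (List String)) (c : Int) :
    ∀ (b : List String) (st : List (String × Int) × PySem.Dict String (List String)),
      b.foldl (fun st n => (st.1 ++ [(n, c)], st.2.insert n (PySem.Dict.getD d n []))) st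
        = (st.1 ++ b.map (fun n => (n, c)),
           b.foldl (fun dd n => dd.insert n (PySem.Dict.getD d n [])) st.2) := by
  intro b
  induction b with
  | nil => intro st; simp
  | cons n b ih =>
      intro st
      rw [List.foldl_cons, ih, List.foldl_cons]
      simp

-- outer output loop: descending bucket sweep produces pvRFlat and the corresponding dict fold
lemma out_loop (d : PySem.Dict String (List String)) (bks : List (List String)) :
    ∀ (k : Nat) (st : List (String × Int) × PySem.Dict String (List String)),
      (PySem.List.pyRange (k : Int) 0 (-1)).foldl
        (fun (st : List (String × Int) × PySem.Dict String (List String)) c =>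
          (PySem.List.pyGetD bks c []).foldl
            (fun st n => (st.1 ++ [(n, c)], st.2.insert n (PySem.Dict.getD d n [])))
            st) st
        = (st.1 ++ pvRFlat bks k,
           (pvRFlat bks k).foldl (fun dd p => dd.insert p.1 (PySem.Dict.getD d p.1 [])) st.2) := by
  intro k
  induction k with
  | zero => intro st; rw [Nat.cast_zero, pyRange_down_zero, pvRFlat]; simp
  | succ k ih =>
      intro st
      have hcast : ((k + 1 : Nat) : Int) = (k : Int) + 1 := by push_cast; ring
      rw [hcast, pyRange_down_succ, List.foldl_cons]
      rw [show ((k : Int) + 1) = ((k + 1 : Nat) : Int) from by push_cast; ring]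
      rw [PySem.List.pyGetD_natCast, inner_out_loop, ih, pvRFlat]
      simp only [Prod.mk.injEq]
      constructor
      · rw [pvTag, List.append_assoc]
      · rw [List.foldl_append, pvTag, List.foldl_map]

-- the bucket-building fold flattens to the insertion-sort fold
lemma build_flat (cl : List String) :
    ∀ (l : List (String × List String)) (bks : List (List String)),
      pvFlat (l.foldl
        (fun bks p =>
          let c : Nat := (PySem.Set.ofList (p.2.filter (fun s => (PySem.Set.ofList cl).contains s))).length
          let bks' := if bks.length ≤ c then bks ++ List.replicate (c + 1 - bks.length) ([] : List String) else bks
          bks'.modify c (fun b => b ++ [p.1])) bks) 0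
      = l.foldl
          (fun acc p => PySem.List.insertBy (fun a b => decide (b.2 < a.2))
            (p.1, ((PySem.Set.ofList (p.2.filter (fun s => (PySem.Set.ofList cl).contains s))).length : Int)) acc)
          (pvFlat bks 0) := by
  intro l
  induction l with
  | nil => intro bks; rfl
  | cons p l ih =>
      intro bks
      rw [List.foldl_cons, List.foldl_cons, ih]
      congr 1
      have h := insert_flat p.1
        ((PySem.Set.ofList (p.2.filter (fun s => (PySem.Set.ofList cl).contains s))).length) bks 0
        (Nat.zero_le _)
      rw [Nat.sub_zero] at h
      rw [step_eq_put, ← h]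

-- the bucket fold is nonempty when the item list is
lemma build_ne_nil (cl : List String) :
    ∀ (l : List (String × List String)) (bks : List (List String)), l ≠ [] →
      (l.foldl
        (fun bks p =>
          let c : Nat := (PySem.Set.ofList (p.2.filter (fun s => (PySem.Set.ofList cl).contains s))).length
          let bks' := if bks.length ≤ c then bks ++ List.replicate (c + 1 - bks.length) ([] : List String) else bks
          bks'.modify c (fun b => b ++ [p.1])) bks) ≠ [] := by
  intro l
  induction l with
  | nil => intro bks h; exact absurd rfl h
  | cons p l ih =>
      intro bks _
      rw [List.foldl_cons]
      cases hl : l with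
      | nil =>
          rw [List.foldl_nil]
          simp only []
          rw [step_eq_put]
          exact pvPut_ne_nil _ _ _
      | cons q l' =>
          rw [← hl]
          exact ih _ (by simp [hl])

-- B's count equals A's count: |{s in skills : s in set(cl)}| = |set(skills) & set(cl)|
lemma count_eq (cl skills : List String) :
    (((PySem.Set.ofList (skills.filter (fun s => (PySem.Set.ofList cl).contains s))).length : Nat) : Int)
      = PySem.Set.len (PySem.Set.inter (PySem.Set.ofList skills) (PySem.Set.ofList cl)) := by
  have h1 : (PySem.Set.ofList (skills.filter (fun s => (PySem.Set.ofList cl).contains s))).Nodup :=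
    PySem.Set.nodup_ofList _
  have h2 : (PySem.Set.inter (PySem.Set.ofList skills) (PySem.Set.ofList cl)).Nodup :=
    (PySem.Set.nodup_ofList skills).filter _
  simp only [PySem.Set.len]
  congr 1
  rw [← List.toFinset_card_of_nodup h1, ← List.toFinset_card_of_nodup h2]
  congr 1
  ext y
  simp [PySem.Set.mem_ofList, PySem.Set.mem_inter, List.mem_filter]

-- main equality
lemma find_eq (ui : List (String × List String)) (cl : List String) :
    find_sim_user ui cl = find_sim_user_alt ui cl := by
  unfold find_sim_user find_sim_user_alt
  simp only []
  set d := ui.foldl (fun dd p => dd.insert p.1 p.2) PySem.Dict.empty with hd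
  have hdnd : d.keys.Nodup :=
    PySem.Dict.nodup_keys_foldl_insert_key ui (fun p => p.1) (fun _ p => p.2)
      PySem.Dict.empty PySem.Dict.nodup_keys_empty
  have humc0 : (d.items.foldl (fun m p => m.insert p.1 (PySem.Set.len (PySem.Set.inter (PySem.Set.ofList p.2) (PySem.Set.ofList cl)))) PySem.Dict.empty).items
             = d.items.map (fun p => (p.1, PySem.Set.len (PySem.Set.inter (PySem.Set.ofList p.2) (PySem.Set.ofList cl)))) := by
    have := PySem.Dict.items_foldl_insert_fresh d.items (fun p => p.1)
      (fun p => PySem.Set.len (PySem.Set.inter (PySem.Set.ofList p.2) (PySem.Set.ofList cl)))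
      PySem.Dict.empty (by intro a _; simp) hdnd
    simpa using this
  rw [humc0]
  set S := PySem.List.sorted (d.items.map (fun p => (p.1, PySem.Set.len (PySem.Set.inter (PySem.Set.ofList p.2) (PySem.Set.ofList cl))))) (fun x => x.2) true with hS
  have hSnd : (S.map (fun p => p.1)).Nodup := by
    have hperm := (PySem.List.sorted_perm (d.items.map (fun p => (p.1, PySem.Set.len (PySem.Set.inter (PySem.Set.ofList p.2) (PySem.Set.ofList cl))))) (fun x => x.2) true).map (fun p => p.1)
    rw [List.map_map] at hperm
    exact hperm.nodup_iff.mpr hdnd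
  have hSnn : ∀ q ∈ S, 0 ≤ q.2 := by
    intro q hq
    have hq' := (PySem.List.mem_sorted _ _ _ _).mp hq
    obtain ⟨p, _, rfl⟩ := List.mem_map.mp hq'
    simp [PySem.Set.len]
  have h5 : (PySem.Dict.ofList S).items = S := ofList_items_of_nodup S hSnd
  have h6 : (S.foldl (fun dd p => if p.2 == 0 then dd.erase p.1 else dd) (PySem.Dict.ofList S)).items
          = S.filter (fun p => decide (0 < p.2)) := by
    rw [erase_fold_items S (PySem.Dict.ofList S), h5]
    apply List.filter_congr
    intro q hq
    by_cases hz : q.2 = 0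
    · have hfalse : ¬ (∀ p ∈ S, (!(p.2 == 0) || !(q.1 == p.1)) = true) := by
        intro hall
        have := hall q hq
        simp [hz] at this
      rw [(Bool.eq_false_iff).mpr (fun h => hfalse (List.all_eq_true.mp h))]
      simp [hz]
    · have hall : ∀ p ∈ S, (!(p.2 == 0) || !(q.1 == p.1)) = true := by
        intro p hp
        by_cases hp0 : p.2 = 0
        · have hne : q.1 ≠ p.1 := by
            intro he
            exact hz (by rw [List.inj_on_of_nodup_map hSnd hq hp he]; exact hp0)
          simp [hne]
        · simp [hp0]
      rw [List.all_eq_true.mpr hall]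
      have : 0 < q.2 := lt_of_le_of_ne (hSnn q hq) (Ne.symm hz)
      simp [this]
  rw [h6]
  set lst := S.filter (fun p => decide (0 < p.2)) with hlst
  have hlstnd : (lst.map (fun p => p.1)).Nodup := by
    have hsub : (lst.map (fun p => p.1)).Sublist (S.map (fun p => p.1)) :=
      List.Sublist.map _ List.filter_sublist
    exact hSnd.sublist hsub
  have hout := outer_loop (fun n => PySem.Dict.getD d n []) lst hlstnd lst [] ([], PySem.Dict.empty)
    (by simp) (by simp) (by simp [PySem.Dict.empty])
  have hz0 : ((List.length ([] : List (String × Int))) : Int) = 0 := by simp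
  rw [hz0] at hout
  -- B side: the buckets flatten to S
  set bks := d.items.foldl
      (fun bks p =>
        let c : Nat := (PySem.Set.ofList (p.2.filter (fun s => (PySem.Set.ofList cl).contains s))).length
        let bks' := if bks.length ≤ c then bks ++ List.replicate (c + 1 - bks.length) ([] : List String) else bks
        bks'.modify c (fun b => b ++ [p.1])) [] with hbks
  have hmap : d.items.map (fun p => (p.1, ((PySem.Set.ofList (p.2.filter (fun s => (PySem.Set.ofList cl).contains s))).length : Int)))
            = d.items.map (fun p => (p.1, PySem.Set.len (PySem.Set.inter (PySem.Set.ofList p.2) (PySem.Set.ofList cl)))) :=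
    List.map_congr_left (fun p _ => by rw [count_eq])
  have hflat : pvFlat bks 0 = S := by
    rw [hbks, build_flat cl d.items [], hS, ← hmap,
        PySem.List.sorted_rev_eq_foldl_insertBy, List.foldl_map]
    rfl
  have htop : (lst.foldl (fun dd p => dd.insert p.1 (PySem.Dict.getD d p.1 [])) PySem.Dict.empty).items
            = lst.map (fun p => (p.1, PySem.Dict.getD d p.1 [])) := by
    have := PySem.Dict.items_foldl_insert_fresh lst (fun p => p.1)
      (fun p => PySem.Dict.getD d p.1 []) PySem.Dict.empty (by intro a _; simp) hlstnd
    simpa using this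
  by_cases hmz : bks = []
  · have hitems : d.items = [] := by
      by_contra hne
      exact build_ne_nil cl d.items [] hne (hbks ▸ hmz)
    have hSnil : S = [] := by rw [hS, hitems]; rfl
    have hlstnil : lst = [] := by rw [hlst, hSnil]; rfl
    rw [hout, hmz, hlstnil]
    simp [PySem.Dict.empty]
  · have hm : bks.length - 1 + 1 = bks.length := by
      have := List.length_pos_of_ne_nil hmz
      omega
    have hcast : ((bks.length : Nat) : Int) - 1 = ((bks.length - 1 : Nat) : Int) := by
      have : 1 ≤ bks.length := by omega
      omega
    rw [hcast, out_loop d bks (bks.length - 1) ([], PySem.Dict.empty)]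
    have hrk : pvRFlat bks (bks.length - 1) = lst := by
      rw [hlst, ← filter_flatIdx bks (bks.length - 1), hm, ← pvFlat_eq_flatIdx, hflat]
    rw [hrk, hout]
    simp only [List.nil_append]
    exact Prod.ext (by rw [htop]) rfl

-- ===== VERDICT (by name: the statement is the Claim_ definition above) =====
theorem find_sim_user_spec : Claim_equal_find_sim_user := by
  intro ui cl _
  exact find_eq ui cl
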